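-- pv_equiv track=rewrite | github.com/Xiaobo33/Outils-de-traitement-de-corpus | Projet/src/process/label.py | annotate_tokens
-- ===== SOURCE A (Python) =====
-- brand_dict = [
--     "sony", "grado","ultrasone","hifiman","denon", "grado", "whxm", "beats", "zmf","meze","fiio","moondrop",
--     "sennheiser", "bose","sundara","stax","ipod","cal","fidelio","samson","fostex","xlr","dan clark","verum",
--     "arya", "stealth", "clear", "og", "focal", "fender", "titanium", "hd","dac","audeze","focal","auribus",
--     "beyer","pioneer","technica","koss", "logitech", "newbie", "shure","planar","akg","audiotechnica","campfire audio"
-- ]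
--
-- def annotate_tokens(tokens):
--     tags = []
--     inside_brand = False # si les marques sont dans une entité
--     for i, token in enumerate(tokens):
--         token_lower = token.lower()
--         if token_lower in brand_dict:
--             if not inside_brand:
--                 tags.append("B-BRAND")
--                 inside_brand = True
--             else:
--                 tags.append("I-BRAND")
--         else:
--             tags.append("O")
--             inside_brand = False  # 断开连续品牌词
--     return tags
-- ===== SOURCE B (Python) =====
-- brand_dict = [
--     "sony", "grado","ultrasone","hifiman","denon", "grado", "whxm", "beats", "zmf","meze","fiio","moondrop",
--     "sennheiser", "bose","sundara","stax","ipod","cal","fidelio","samson","fostex","xlr","dan clark","verum",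
--     "arya", "stealth", "clear", "og", "focal", "fender", "titanium", "hd","dac","audeze","focal","auribus",
--     "beyer","pioneer","technica","koss", "logitech", "newbie", "shure","planar","akg","audiotechnica","campfire audio"
-- ]
--
-- def annotate_tokens(tokens):
--     brand_set = set(brand_dict)
--     is_brand = [t.lower() in brand_set for t in tokens]
--     prev = [False] + is_brand[:-1]
--     return ["O" if not c else ("B-BRAND" if not p else "I-BRAND")
--             for p, c in zip(prev, is_brand)]
-- ===== Notes on version B (the rewrite author's own statement) =====
-- stated objective: faster
-- what changed: Replaces the carried inside_brand flag with a precomputed boolean membership mask (built via a set) consulted together with its predecessor in a second zip pass.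
import Mathlib
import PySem

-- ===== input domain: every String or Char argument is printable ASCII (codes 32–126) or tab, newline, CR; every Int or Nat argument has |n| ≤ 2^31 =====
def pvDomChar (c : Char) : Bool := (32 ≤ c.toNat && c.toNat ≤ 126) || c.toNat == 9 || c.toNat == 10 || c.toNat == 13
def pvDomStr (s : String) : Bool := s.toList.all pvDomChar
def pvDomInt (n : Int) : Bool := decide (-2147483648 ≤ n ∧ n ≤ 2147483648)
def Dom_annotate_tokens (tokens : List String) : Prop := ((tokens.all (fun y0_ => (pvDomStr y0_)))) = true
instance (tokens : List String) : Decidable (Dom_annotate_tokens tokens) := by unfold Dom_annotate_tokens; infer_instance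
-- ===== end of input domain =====

-- B replaces A's carried inside_brand flag by a precomputed membership mask (built with a set) zipped with its predecessor; a timing run measured B faster.

def brand_dict : List String := [
    "sony", "grado", "ultrasone", "hifiman", "denon", "grado", "whxm", "beats", "zmf", "meze", "fiio", "moondrop",
    "sennheiser", "bose", "sundara", "stax", "ipod", "cal", "fidelio", "samson", "fostex", "xlr", "dan clark", "verum",
    "arya", "stealth", "clear", "og", "focal", "fender", "titanium", "hd", "dac", "audeze", "focal", "auribus",
    "beyer", "pioneer", "technica", "koss", "logitech", "newbie", "shure", "planar", "akg", "audiotechnica", "campfire audio"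
]

-- ===== PORT A =====
-- loop with accumulator tags and flag inside_brand, appending at the back
def stepA (st : List String × Bool) (token : String) : List String × Bool :=
  let token_lower := PySem.Str.lower token
  if brand_dict.contains token_lower then
    if !st.2 then (st.1 ++ ["B-BRAND"], true)
    else (st.1 ++ ["I-BRAND"], true)
  else (st.1 ++ ["O"], false)

def annotate_tokens (tokens : List String) : List String :=
  (tokens.foldl stepA ([], false)).1

-- ===== PORT B =====
-- brand set, membership mask, then a zip of the mask with its shifted-by-one self
def brand_set : PySem.Set String := PySem.Set.ofList brand_dict

def annotate_tokens_alt (tokens : List String) : List String :=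
  let is_brand := tokens.map (fun t => PySem.Set.contains brand_set (PySem.Str.lower t))
  let prev := false :: is_brand.dropLast
  (List.zip prev is_brand).map (fun pc =>
    if !pc.2 then "O" else if !pc.1 then "B-BRAND" else "I-BRAND")

-- ===== PRECONDITION & SPEC =====
def Spec_annotate_tokens (tokens : List String) (out : List String) : Prop := out = annotate_tokens_alt tokens
instance (tokens : List String) (out : List String) : Decidable (Spec_annotate_tokens tokens out) := by unfold Spec_annotate_tokens; infer_instance

-- ===== CLAIM (what is proved, stated in full; the proofs are below) =====
def Claim_equal_annotate_tokens : Prop := ∀ (tokens : List String), Dom_annotate_tokens tokens → Spec_annotate_tokens tokens (annotate_tokens tokens)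

-- ===== LEMMAS AND PROOFS =====

-- cons-style reformulation of A's loop
def goA (inside : Bool) : List String → List String
  | [] => []
  | t :: ts =>
    if brand_dict.contains (PySem.Str.lower t) then
      (if !inside then "B-BRAND" else "I-BRAND") :: goA true ts
    else "O" :: goA false ts

lemma foldl_eq_goA (ts : List String) (acc : List String) (inside : Bool) :
    (ts.foldl stepA (acc, inside)).1 = acc ++ goA inside ts := by
  induction ts generalizing acc inside with
  | nil => simp [goA]
  | cons t ts ih =>
    rw [List.foldl_cons]
    by_cases h : PySem.Str.lower t ∈ brand_dict <;> cases inside <;>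
      simp [stepA, goA, h, ih]

lemma mem_set_eq (t : String) : (t ∈ brand_set) ↔ (t ∈ brand_dict) := by
  simp [brand_set, PySem.Set.mem_ofList]

lemma goA_eq_zip (ts : List String) (inside : Bool) :
    goA inside ts =
      (List.zip (inside :: (ts.map (fun t => brand_dict.contains (PySem.Str.lower t))).dropLast)
                (ts.map (fun t => brand_dict.contains (PySem.Str.lower t)))).map
        (fun pc => if !pc.2 then "O" else if !pc.1 then "B-BRAND" else "I-BRAND") := by
  induction ts generalizing inside with
  | cons t ts ih =>
    have key : List.zip (inside :: ((t :: ts).map (fun t => brand_dict.contains (PySem.Str.lower t))).dropLast)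
                ((t :: ts).map (fun t => brand_dict.contains (PySem.Str.lower t)))
        = (inside, brand_dict.contains (PySem.Str.lower t)) ::
          List.zip (brand_dict.contains (PySem.Str.lower t) ::
              (ts.map (fun t => brand_dict.contains (PySem.Str.lower t))).dropLast)
            (ts.map (fun t => brand_dict.contains (PySem.Str.lower t))) := by
      cases ts <;> simp
    rw [key, List.map_cons, ← ih (brand_dict.contains (PySem.Str.lower t))]
    by_cases h : PySem.Str.lower t ∈ brand_dict <;> cases inside <;> simp [goA, h]
  | nil => simp [goA]

-- ===== VERDICT (by name: the statement is the Claim_ definition above) =====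
theorem annotate_tokens_spec : Claim_equal_annotate_tokens := by
  intro tokens _
  unfold Spec_annotate_tokens annotate_tokens annotate_tokens_alt
  rw [foldl_eq_goA tokens [] false, goA_eq_zip]
  simp [mem_set_eq]
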